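-- pv_equiv track=rewrite | github.com/hasnainkhan8532/MultiAgent-Using-Langchain | app/services/google_apis_service.py | _determine_location_type
-- ===== SOURCE A (Python) =====
-- from typing import List, Dict, Any, Optional
--
-- def _determine_location_type(nearby_businesses: List[Dict[str, Any]]) -> str:
--     """Determine the type of location based on nearby businesses"""
--     if not nearby_businesses:
--         return "unknown"
--
--     # Count different types of businesses
--     business_types = {}
--     for business in nearby_businesses:
--         types = business.get('types', [])
--         for business_type in types:
--             business_types[business_type] = business_types.get(business_type, 0) + 1
--
--     # Determine location type based on most common business types
--     if 'shopping_mall' in business_types or 'store' in business_types: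
--         return "commercial"
--     elif 'restaurant' in business_types or 'food' in business_types:
--         return "dining"
--     elif 'hospital' in business_types or 'health' in business_types:
--         return "healthcare"
--     elif 'school' in business_types or 'university' in business_types:
--         return "educational"
--     else:
--         return "mixed"
-- ===== SOURCE B (Python) =====
-- from typing import List, Dict, Any
--
-- # keyword -> (priority rank, label); smaller rank wins
-- _RANK = {
--     'shopping_mall': (0, "commercial"),
--     'store': (0, "commercial"),
--     'restaurant': (1, "dining"),
--     'food': (1, "dining"),
--     'hospital': (2, "healthcare"),
--     'health': (2, "healthcare"),
--     'school': (3, "educational"),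
--     'university': (3, "educational"),
-- }
--
-- def _determine_location_type(nearby_businesses: List[Dict[str, Any]]) -> str:
--     if not nearby_businesses:
--         return "unknown"
--     # single pass: keep the (rank, label) pair with the minimum rank seen
--     best = (4, "mixed")
--     for business in nearby_businesses:
--         for t in business.get('types', []):
--             cand = _RANK.get(t, (4, "mixed"))
--             if cand[0] < best[0]:
--                 best = cand
--     return best[1]
-- ===== Notes on version B (the rewrite author's own statement) =====
-- stated objective: alternative
-- what changed: Replaced the count-table-then-ordered-membership-checks scheme by a single-pass minimum reduction: each keyword maps to a (priority, label) pair and B keeps the pair with the smallest priority while scanning the tags once, so there is no counting dict and no branch chain.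
import Mathlib
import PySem

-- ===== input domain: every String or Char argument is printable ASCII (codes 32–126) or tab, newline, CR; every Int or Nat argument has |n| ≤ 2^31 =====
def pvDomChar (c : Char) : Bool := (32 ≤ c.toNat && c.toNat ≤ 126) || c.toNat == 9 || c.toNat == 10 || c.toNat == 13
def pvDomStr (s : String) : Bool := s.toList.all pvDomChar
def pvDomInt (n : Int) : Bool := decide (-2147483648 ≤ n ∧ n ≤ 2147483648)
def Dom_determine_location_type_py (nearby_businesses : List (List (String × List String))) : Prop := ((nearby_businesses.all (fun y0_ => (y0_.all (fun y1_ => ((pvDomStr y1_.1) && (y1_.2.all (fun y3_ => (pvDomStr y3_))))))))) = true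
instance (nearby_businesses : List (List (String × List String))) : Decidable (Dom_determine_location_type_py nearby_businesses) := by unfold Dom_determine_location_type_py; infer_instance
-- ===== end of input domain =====

-- B replaces A's counting-dict pass plus the ordered keyword-membership branch chain by a single-pass minimum reduction over (priority, label) pairs; same results, alternative decomposition (no speed claim).


-- ===== PORT A =====
def determine_location_type_py (nearby_businesses : List (List (String × List String))) : String :=
  if nearby_businesses = [] then "unknown"
  else
    let business_types : PySem.Dict String Int :=
      nearby_businesses.foldl
        (fun d business =>
          (PySem.Dict.getD (PySem.Dict.mk business) "types" []).foldl
            (fun d t => d.modify t 0 (· + 1)) d)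
        PySem.Dict.empty
    if business_types.contains "shopping_mall" || business_types.contains "store" then "commercial"
    else if business_types.contains "restaurant" || business_types.contains "food" then "dining"
    else if business_types.contains "hospital" || business_types.contains "health" then "healthcare"
    else if business_types.contains "school" || business_types.contains "university" then "educational"
    else "mixed"

-- ===== PORT B =====
-- B: keyword -> (priority rank, label); the scan keeps the pair with the minimum rank
def dlRank : PySem.Dict String (Int × String) :=
  PySem.Dict.mk
    [("shopping_mall", (0, "commercial")), ("store", (0, "commercial")),
     ("restaurant", (1, "dining")), ("food", (1, "dining")),
     ("hospital", (2, "healthcare")), ("health", (2, "healthcare")),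
     ("school", (3, "educational")), ("university", (3, "educational"))]

def determine_location_type_py_alt (nearby_businesses : List (List (String × List String))) : String :=
  if nearby_businesses = [] then "unknown"
  else
    (nearby_businesses.foldl
      (fun best business =>
        (PySem.Dict.getD (PySem.Dict.mk business) "types" []).foldl
          (fun best t =>
            let cand := PySem.Dict.getD dlRank t ((4 : Int), "mixed")
            if cand.1 < best.1 then cand else best)
          best)
      ((4 : Int), "mixed")).2

-- ===== PRECONDITION & SPEC =====
def Spec_determine_location_type_py (nearby_businesses : List (List (String × List String))) (out : String) : Prop := out = determine_location_type_py_alt nearby_businesses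
instance (nearby_businesses : List (List (String × List String))) (out : String) : Decidable (Spec_determine_location_type_py nearby_businesses out) := by unfold Spec_determine_location_type_py; infer_instance

-- ===== CLAIM =====
def Claim_equal_determine_location_type_py : Prop := ∀ (nearby_businesses : List (List (String × List String))), Dom_determine_location_type_py nearby_businesses → Spec_determine_location_type_py nearby_businesses (determine_location_type_py nearby_businesses)

-- ===== LEMMAS AND PROOFS =====

-- abbreviations used only by the proofs
def dlTags (b : List (String × List String)) : List String :=
  PySem.Dict.getD (PySem.Dict.mk b) "types" []

def dlG (t : String) : Int × String := PySem.Dict.getD dlRank t ((4 : Int), "mixed")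

def dlLabel (k : Int) : String :=
  if k = 0 then "commercial" else if k = 1 then "dining" else if k = 2 then "healthcare"
  else if k = 3 then "educational" else "mixed"

theorem dlG_char (t : String) :
    dlG t = if t = "shopping_mall" ∨ t = "store" then ((0 : Int), "commercial")
      else if t = "restaurant" ∨ t = "food" then ((1 : Int), "dining")
      else if t = "hospital" ∨ t = "health" then ((2 : Int), "healthcare")
      else if t = "school" ∨ t = "university" then ((3 : Int), "educational")
      else ((4 : Int), "mixed") := by
  simp only [dlG, dlRank, PySem.Dict.getD, PySem.Dict.get?_mk_cons, beq_iff_eq]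
  split_ifs <;> subst_vars <;> simp_all [PySem.Dict.get?, @eq_comm String]

theorem dlG_pair (t : String) : dlG t = ((dlG t).1, dlLabel (dlG t).1) := by
  rw [dlG_char]; split_ifs <;> simp [dlLabel]

theorem dlG_bounds (t : String) : 0 ≤ (dlG t).1 ∧ (dlG t).1 ≤ 4 := by
  rw [dlG_char]; split_ifs <;> simp

theorem dlG_rank0 (t : String) : (dlG t).1 = 0 ↔ (t = "shopping_mall" ∨ t = "store") := by
  rw [dlG_char]; split_ifs <;> simp_all <;> rename_i h <;> rcases h with rfl | rfl <;> simp
theorem dlG_rank1 (t : String) : (dlG t).1 = 1 ↔ (t = "restaurant" ∨ t = "food") := by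
  rw [dlG_char]; split_ifs <;> simp_all <;> rename_i h <;> rcases h with rfl | rfl <;> simp
theorem dlG_rank2 (t : String) : (dlG t).1 = 2 ↔ (t = "hospital" ∨ t = "health") := by
  rw [dlG_char]; split_ifs <;> simp_all <;> rename_i h <;> rcases h with rfl | rfl <;> simp
theorem dlG_rank3 (t : String) : (dlG t).1 = 3 ↔ (t = "school" ∨ t = "university") := by
  rw [dlG_char]; split_ifs <;> simp_all <;> rename_i h <;> rcases h with rfl | rfl <;> simp

-- the numeric shadow of B's fold
def dlMI (l : List String) (a : Int) : Int := l.foldl (fun a t => min a (dlG t).1) a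
def dlM (nb : List (List (String × List String))) (a : Int) : Int :=
  nb.foldl (fun a b => dlMI (dlTags b) a) a

theorem dlFold_inner (l : List String) (k : Int) :
    l.foldl (fun best t =>
        let cand := PySem.Dict.getD dlRank t ((4 : Int), "mixed")
        if cand.1 < best.1 then cand else best) (k, dlLabel k)
      = (dlMI l k, dlLabel (dlMI l k)) := by
  induction l generalizing k with
  | nil => simp [dlMI]
  | cons t ts ih =>
    simp only [List.foldl_cons, dlMI]
    have hg : PySem.Dict.getD dlRank t ((4 : Int), "mixed") = ((dlG t).1, dlLabel (dlG t).1) :=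
      dlG_pair t
    rw [hg]
    by_cases h : (dlG t).1 < k
    · simp only [h, if_true, min_eq_right (le_of_lt h)]
      exact ih ((dlG t).1)
    · simp only [h, if_false, min_eq_left (not_lt.mp h)]
      exact ih k

theorem dlFold_outer (nb : List (List (String × List String))) (k : Int) :
    nb.foldl (fun best business =>
        (PySem.Dict.getD (PySem.Dict.mk business) "types" []).foldl
          (fun best t =>
            let cand := PySem.Dict.getD dlRank t ((4 : Int), "mixed")
            if cand.1 < best.1 then cand else best) best) (k, dlLabel k)
      = (dlM nb k, dlLabel (dlM nb k)) := by
  induction nb generalizing k with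
  | nil => simp [dlM]
  | cons b bs ih =>
    simp only [List.foldl_cons, dlM]
    rw [show PySem.Dict.getD (PySem.Dict.mk b) "types" [] = dlTags b from rfl,
      dlFold_inner (dlTags b) k]
    exact ih (dlMI (dlTags b) k)

theorem dlMI_le_iff (l : List String) (a j : Int) :
    dlMI l a ≤ j ↔ a ≤ j ∨ ∃ t ∈ l, (dlG t).1 ≤ j := by
  induction l generalizing a with
  | nil => simp [dlMI]
  | cons t ts ih =>
    simp only [dlMI, List.foldl_cons] at *
    rw [ih, min_le_iff]
    simp only [List.mem_cons]
    constructor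
    · rintro ((h | h) | ⟨u, hu, hr⟩)
      · exact Or.inl h
      · exact Or.inr ⟨t, Or.inl rfl, h⟩
      · exact Or.inr ⟨u, Or.inr hu, hr⟩
    · rintro (h | ⟨u, (rfl | hu), hr⟩)
      · exact Or.inl (Or.inl h)
      · exact Or.inl (Or.inr hr)
      · exact Or.inr ⟨u, hu, hr⟩

theorem dlM_le_iff (nb : List (List (String × List String))) (a j : Int) :
    dlM nb a ≤ j ↔ a ≤ j ∨ ∃ b ∈ nb, ∃ t ∈ dlTags b, (dlG t).1 ≤ j := by
  induction nb generalizing a with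
  | nil => simp [dlM]
  | cons b bs ih =>
    simp only [dlM, List.foldl_cons] at *
    rw [ih, dlMI_le_iff]
    simp only [List.mem_cons]
    constructor
    · rintro ((h | ⟨t, ht, hr⟩) | ⟨c, hc, t, ht, hr⟩)
      · exact Or.inl h
      · exact Or.inr ⟨b, Or.inl rfl, t, ht, hr⟩
      · exact Or.inr ⟨c, Or.inr hc, t, ht, hr⟩
    · rintro (h | ⟨c, (rfl | hc), t, ht, hr⟩)
      · exact Or.inl (Or.inl h)
      · exact Or.inl (Or.inr ⟨t, ht, hr⟩)
      · exact Or.inr ⟨c, hc, t, ht, hr⟩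

theorem dlM_nonneg (nb : List (List (String × List String))) (a : Int) (ha : 0 ≤ a) :
    0 ≤ dlM nb a := by
  by_contra h
  push_neg at h
  rcases (dlM_le_iff nb a (-1)).mp (by omega) with h' | ⟨_, _, t, _, hr⟩
  · omega
  · exact absurd hr (by have := (dlG_bounds t).1; omega)

-- A-side characterisation (counting dict membership = presence of a tag)
theorem contains_foldl_modify (l : List String) (d : PySem.Dict String Int) (k : String) :
    (l.foldl (fun d t => d.modify t 0 (· + 1)) d).contains k
      = (d.contains k || l.contains k) := by
  induction l generalizing d with
  | nil => simp
  | cons t ts ih =>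
    simp only [List.foldl_cons, ih, PySem.Dict.contains_modify, List.contains_cons]
    cases h : (k == t) <;> simp_all

theorem contains_nested (nb : List (List (String × List String)))
    (d : PySem.Dict String Int) (k : String) :
    (nb.foldl (fun d business =>
        (PySem.Dict.getD (PySem.Dict.mk business) "types" []).foldl
          (fun d t => d.modify t 0 (· + 1)) d) d).contains k
      = (d.contains k || nb.any (fun b => (dlTags b).contains k)) := by
  induction nb generalizing d with
  | nil => simp
  | cons b bs ih =>
    simp only [List.foldl_cons, ih, contains_foldl_modify, List.any_cons, Bool.or_assoc]
    rfl

theorem any_pair_prop (nb : List (List (String × List String))) (k1 k2 : String) :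
    ((nb.any (fun b => (dlTags b).contains k1)
      || nb.any (fun b => (dlTags b).contains k2)) = true)
      ↔ ∃ b ∈ nb, ∃ t ∈ dlTags b, (t = k1 ∨ t = k2) := by
  simp only [Bool.or_eq_true, List.any_eq_true, List.contains_iff_mem]
  constructor
  · rintro (⟨b, hb, ht⟩ | ⟨b, hb, ht⟩) <;> exact ⟨b, hb, _, ht, by simp⟩
  · rintro ⟨b, hb, t, ht, h | h⟩
    · exact Or.inl ⟨b, hb, h ▸ ht⟩
    · exact Or.inr ⟨b, hb, h ▸ ht⟩

theorem determine_location_type_py_spec : Claim_equal_determine_location_type_py := by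
  intro nb _
  unfold Spec_determine_location_type_py determine_location_type_py determine_location_type_py_alt
  by_cases hnil : nb = []
  · simp [hnil]
  · simp only [hnil, if_false]
    have hfold := dlFold_outer nb 4
    simp only [show dlLabel 4 = "mixed" from by norm_num [dlLabel]] at hfold
    rw [hfold]
    simp only [contains_nested nb PySem.Dict.empty, PySem.Dict.contains_empty, Bool.false_or]
    set M := dlM nb 4 with hM
    have hub : M ≤ 4 := (dlM_le_iff nb 4 4).mpr (Or.inl le_rfl)
    have hlb : 0 ≤ M := dlM_nonneg nb 4 (by norm_num)
    have key : ∀ j : Int, j < 4 → (M ≤ j ↔ ∃ b ∈ nb, ∃ t ∈ dlTags b, (dlG t).1 ≤ j) := by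
      intro j hj
      rw [hM, dlM_le_iff]
      constructor
      · rintro (h | h); · omega
        · exact h
      · exact Or.inr
    by_cases h0 : ((nb.any (fun b => (dlTags b).contains "shopping_mall")
        || nb.any (fun b => (dlTags b).contains "store")) = true)
    · obtain ⟨b, hb, t, ht, hr⟩ := (any_pair_prop nb _ _).mp h0
      have : M ≤ 0 := (key 0 (by norm_num)).mpr ⟨b, hb, t, ht, le_of_eq ((dlG_rank0 t).mpr hr)⟩
      have hM0 : M = 0 := le_antisymm this hlb
      rw [if_pos h0, hM0]; norm_num [dlLabel]
    · have n0 : ¬ ∃ b ∈ nb, ∃ t ∈ dlTags b, (dlG t).1 = 0 := by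
        intro ⟨b, hb, t, ht, hr⟩
        exact h0 ((any_pair_prop nb _ _).mpr ⟨b, hb, t, ht, (dlG_rank0 t).mp hr⟩)
      by_cases h1 : ((nb.any (fun b => (dlTags b).contains "restaurant")
          || nb.any (fun b => (dlTags b).contains "food")) = true)
      · obtain ⟨b, hb, t, ht, hr⟩ := (any_pair_prop nb _ _).mp h1
        have hle : M ≤ 1 :=
          (key 1 (by norm_num)).mpr ⟨b, hb, t, ht, le_of_eq ((dlG_rank1 t).mpr hr)⟩
        have hne : M ≠ 0 := by
          intro hM0
          obtain ⟨b', hb', t', ht', hr'⟩ := (key 0 (by norm_num)).mp (le_of_eq hM0)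
          exact n0 ⟨b', hb', t', ht', le_antisymm hr' (dlG_bounds t').1⟩
        have hM1 : M = 1 := by omega
        rw [if_neg h0, if_pos h1, hM1]; norm_num [dlLabel]
      · have n1 : ¬ ∃ b ∈ nb, ∃ t ∈ dlTags b, (dlG t).1 = 1 := by
          intro ⟨b, hb, t, ht, hr⟩
          exact h1 ((any_pair_prop nb _ _).mpr ⟨b, hb, t, ht, (dlG_rank1 t).mp hr⟩)
        by_cases h2 : ((nb.any (fun b => (dlTags b).contains "hospital")
            || nb.any (fun b => (dlTags b).contains "health")) = true)
        · obtain ⟨b, hb, t, ht, hr⟩ := (any_pair_prop nb _ _).mp h2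
          have hle : M ≤ 2 :=
            (key 2 (by norm_num)).mpr ⟨b, hb, t, ht, le_of_eq ((dlG_rank2 t).mpr hr)⟩
          have hne : M ≠ 0 ∧ M ≠ 1 := by
            constructor <;> intro hMv
            · obtain ⟨b', hb', t', ht', hr'⟩ := (key 0 (by norm_num)).mp (le_of_eq hMv)
              exact n0 ⟨b', hb', t', ht', le_antisymm hr' (dlG_bounds t').1⟩
            · obtain ⟨b', hb', t', ht', hr'⟩ := (key 1 (by norm_num)).mp (le_of_eq hMv)
              rcases show (dlG t').1 = 0 ∨ (dlG t').1 = 1 from by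
                  have := (dlG_bounds t').1; omega with h | h
              · exact n0 ⟨b', hb', t', ht', h⟩
              · exact n1 ⟨b', hb', t', ht', h⟩
          have hM2 : M = 2 := by omega
          rw [if_neg h0, if_neg h1, if_pos h2, hM2]; norm_num [dlLabel]
        · have n2 : ¬ ∃ b ∈ nb, ∃ t ∈ dlTags b, (dlG t).1 = 2 := by
            intro ⟨b, hb, t, ht, hr⟩
            exact h2 ((any_pair_prop nb _ _).mpr ⟨b, hb, t, ht, (dlG_rank2 t).mp hr⟩)
          by_cases h3 : ((nb.any (fun b => (dlTags b).contains "school")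
              || nb.any (fun b => (dlTags b).contains "university")) = true)
          · obtain ⟨b, hb, t, ht, hr⟩ := (any_pair_prop nb _ _).mp h3
            have hle : M ≤ 3 :=
              (key 3 (by norm_num)).mpr ⟨b, hb, t, ht, le_of_eq ((dlG_rank3 t).mpr hr)⟩
            have hne : M ≠ 0 ∧ M ≠ 1 ∧ M ≠ 2 := by
              refine ⟨?_, ?_, ?_⟩ <;> intro hMv <;>
                obtain ⟨b', hb', t', ht', hr'⟩ := (key _ (by omega)).mp (le_of_eq hMv) <;>
                [skip; skip; skip]
              · exact n0 ⟨b', hb', t', ht', le_antisymm hr' (dlG_bounds t').1⟩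
              · rcases show (dlG t').1 = 0 ∨ (dlG t').1 = 1 from by
                    have := (dlG_bounds t').1; omega with h | h
                · exact n0 ⟨b', hb', t', ht', h⟩
                · exact n1 ⟨b', hb', t', ht', h⟩
              · rcases show (dlG t').1 = 0 ∨ (dlG t').1 = 1 ∨ (dlG t').1 = 2 from by
                    have := (dlG_bounds t').1; omega with h | h | h
                · exact n0 ⟨b', hb', t', ht', h⟩
                · exact n1 ⟨b', hb', t', ht', h⟩
                · exact n2 ⟨b', hb', t', ht', h⟩
            have hM3 : M = 3 := by omega
            rw [if_neg h0, if_neg h1, if_neg h2, if_pos h3, hM3]; norm_num [dlLabel]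
          · have n3 : ¬ ∃ b ∈ nb, ∃ t ∈ dlTags b, (dlG t).1 = 3 := by
              intro ⟨b, hb, t, ht, hr⟩
              exact h3 ((any_pair_prop nb _ _).mpr ⟨b, hb, t, ht, (dlG_rank3 t).mp hr⟩)
            have hM4 : M = 4 := by
              by_contra hne
              have : M ≤ 3 := by omega
              obtain ⟨b', hb', t', ht', hr'⟩ := (key 3 (by norm_num)).mp this
              rcases show (dlG t').1 = 0 ∨ (dlG t').1 = 1 ∨ (dlG t').1 = 2 ∨ (dlG t').1 = 3
                  from by have := (dlG_bounds t').1; omega with h | h | h | h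
              · exact n0 ⟨b', hb', t', ht', h⟩
              · exact n1 ⟨b', hb', t', ht', h⟩
              · exact n2 ⟨b', hb', t', ht', h⟩
              · exact n3 ⟨b', hb', t', ht', h⟩
            rw [if_neg h0, if_neg h1, if_neg h2, if_neg h3, hM4]; norm_num [dlLabel]
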